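-- pv_equiv track=rewrite | github.com/vmizener/adventofcode | 2021/19/main.py | find_matching_neighbors
-- ===== SOURCE A (Python) =====
-- def find_matching_neighbors(principle_map, scanner_maps):
--     # Find first set of neighbors with matching hash to a set in the principle
--     for principle_hash in principle_map.keys():
--         for scanner, scanner_map in scanner_maps.items():
--             for scanner_hash in scanner_map.keys():
--                 if scanner_hash == principle_hash:
--                     principle_neighbors = principle_map[scanner_hash]
--                     scanner_neighbors = scanner_map[scanner_hash]
--                     return (scanner, principle_neighbors, scanner_neighbors)
--     raise RuntimeError()
-- ===== SOURCE B (Python) =====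
-- def find_matching_neighbors(principle_map, scanner_maps):
--     # Build a reverse index in one pass: hash -> (first owning scanner, its map).
--     index = {}
--     for scanner, scanner_map in scanner_maps.items():
--         for h in scanner_map:
--             if h not in index:
--                 index[h] = (scanner, scanner_map)
--     # Single pass over the principle hashes, in order.
--     for h, principle_neighbors in principle_map.items():
--         if h in index:
--             scanner, scanner_map = index[h]
--             return (scanner, principle_neighbors, scanner_map[h])
--     raise RuntimeError()
-- ===== Notes on version B (the rewrite author's own statement) =====
-- stated objective: faster
-- what changed: Replaces A's triple-nested repeated scan (for each principle hash, rescan every scanner map key by key) with a single index-building pass over the scanner maps (hash -> first owning scanner and its map) followed by one lookup pass over the principle hashes; intended as faster (a timing run measured B 46x at the largest size both finished).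
import Mathlib
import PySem

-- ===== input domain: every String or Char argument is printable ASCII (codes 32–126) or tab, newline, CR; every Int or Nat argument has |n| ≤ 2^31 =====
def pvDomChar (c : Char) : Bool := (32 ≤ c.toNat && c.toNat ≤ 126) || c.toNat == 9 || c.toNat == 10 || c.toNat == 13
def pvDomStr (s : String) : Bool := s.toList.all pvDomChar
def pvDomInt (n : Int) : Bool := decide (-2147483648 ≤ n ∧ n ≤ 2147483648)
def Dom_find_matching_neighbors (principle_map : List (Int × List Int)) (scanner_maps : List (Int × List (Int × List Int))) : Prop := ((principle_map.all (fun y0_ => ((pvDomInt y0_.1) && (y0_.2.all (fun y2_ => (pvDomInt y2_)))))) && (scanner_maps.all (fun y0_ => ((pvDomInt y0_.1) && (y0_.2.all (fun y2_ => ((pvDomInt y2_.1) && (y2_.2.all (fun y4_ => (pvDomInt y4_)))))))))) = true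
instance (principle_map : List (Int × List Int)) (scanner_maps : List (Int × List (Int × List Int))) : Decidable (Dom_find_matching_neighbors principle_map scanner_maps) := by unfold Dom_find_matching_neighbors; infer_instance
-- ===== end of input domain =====

-- B replaces A's triple-nested repeated scan with a one-pass reverse index (hash -> first owning
-- scanner) followed by a single lookup pass over the principle hashes; intended as faster
-- (timing run measured B 46x at the largest size both Pythons finished).

-- ===== PORT A =====
-- shared dict lookup helper: first match, [] default (both Pythons index dicts whose key is known present)
def pvGetD (m : List (Int × List Int)) (k : Int) : List Int :=
  match m with
  | [] => []
  | (a, b) :: t => if a = k then b else pvGetD t k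

-- inner loop: for scanner_hash in scanner_map.keys(): if scanner_hash == principle_hash: return …
def pvKeyLoopA (principle_map : List (Int × List Int)) (scanner : Int)
    (scanner_map : List (Int × List Int)) (ph : Int) :
    List (Int × List Int) → Option (Int × List Int × List Int)
  | [] => none
  | (sh, _) :: rest =>
    if sh = ph then some (scanner, pvGetD principle_map sh, pvGetD scanner_map sh)
    else pvKeyLoopA principle_map scanner scanner_map ph rest

-- middle loop: for scanner, scanner_map in scanner_maps.items()
def pvScanLoopA (principle_map : List (Int × List Int)) (ph : Int) :
    List (Int × List (Int × List Int)) → Option (Int × List Int × List Int)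
  | [] => none
  | (scanner, scanner_map) :: rest =>
    match pvKeyLoopA principle_map scanner scanner_map ph scanner_map with
    | some r => some r
    | none => pvScanLoopA principle_map ph rest

-- outer loop: for principle_hash in principle_map.keys()
def pvPrinLoopA (principle_map : List (Int × List Int))
    (scanner_maps : List (Int × List (Int × List Int))) :
    List (Int × List Int) → Option (Int × List Int × List Int)
  | [] => none
  | (ph, _) :: rest =>
    match pvScanLoopA principle_map ph scanner_maps with
    | some r => some r
    | none => pvPrinLoopA principle_map scanner_maps rest

-- none = the RuntimeError path, excluded by Pre_
def find_matching_neighbors (principle_map : List (Int × List Int)) (scanner_maps : List (Int × List (Int × List Int))) : Int × List Int × List Int :=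
  (pvPrinLoopA principle_map scanner_maps principle_map).getD (0, [], [])

-- ===== PORT B =====
def pvIdxContains (idx : List (Int × Int × List (Int × List Int))) (h : Int) : Bool :=
  match idx with
  | [] => false
  | (k, _) :: t => k = h || pvIdxContains t h

def pvIdxGet? (idx : List (Int × Int × List (Int × List Int))) (h : Int) :
    Option (Int × List (Int × List Int)) :=
  match idx with
  | [] => none
  | (k, v) :: t => if k = h then some v else pvIdxGet? t h

-- for h in scanner_map: if h not in index: index[h] = (scanner, scanner_map)
def pvAddKeys (scanner : Int) (scanner_map : List (Int × List Int))
    (idx : List (Int × Int × List (Int × List Int))) :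
    List (Int × List Int) → List (Int × Int × List (Int × List Int))
  | [] => idx
  | (h, _) :: rest =>
    pvAddKeys scanner scanner_map
      (if pvIdxContains idx h then idx else idx ++ [(h, (scanner, scanner_map))]) rest

-- for scanner, scanner_map in scanner_maps.items()
def pvBuildIndex (idx : List (Int × Int × List (Int × List Int))) :
    List (Int × List (Int × List Int)) → List (Int × Int × List (Int × List Int))
  | [] => idx
  | (scanner, scanner_map) :: rest =>
    pvBuildIndex (pvAddKeys scanner scanner_map idx scanner_map) rest

-- for h, principle_neighbors in principle_map.items(): if h in index: return …
def pvLookupLoopB (idx : List (Int × Int × List (Int × List Int))) :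
    List (Int × List Int) → Option (Int × List Int × List Int)
  | [] => none
  | (h, principle_neighbors) :: rest =>
    match pvIdxGet? idx h with
    | some (scanner, scanner_map) => some (scanner, principle_neighbors, pvGetD scanner_map h)
    | none => pvLookupLoopB idx rest

def find_matching_neighbors_alt (principle_map : List (Int × List Int)) (scanner_maps : List (Int × List (Int × List Int))) : Int × List Int × List Int :=
  (pvLookupLoopB (pvBuildIndex [] scanner_maps) principle_map).getD (0, [], [])

-- ===== PRECONDITION & SPEC =====
-- Pre_ excludes exactly the inputs with no shared hash, on which Python A raises RuntimeError
-- (and Python B raises RuntimeError too).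
def Pre_find_matching_neighbors (principle_map : List (Int × List Int)) (scanner_maps : List (Int × List (Int × List Int))) : Prop :=
  ∃ p ∈ principle_map, ∃ s ∈ scanner_maps, p.1 ∈ s.2.map Prod.fst
instance (principle_map : List (Int × List Int)) (scanner_maps : List (Int × List (Int × List Int))) : Decidable (Pre_find_matching_neighbors principle_map scanner_maps) := by unfold Pre_find_matching_neighbors; infer_instance

def pvWitness_find_matching_neighbors : (List (Int × List Int)) × (List (Int × List (Int × List Int))) :=
  ([(1, [2, 3])], [(5, [(1, [4])])])

def Spec_find_matching_neighbors (principle_map : List (Int × List Int)) (scanner_maps : List (Int × List (Int × List Int))) (out : Int × List Int × List Int) : Prop := out = find_matching_neighbors_alt principle_map scanner_maps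
instance (principle_map : List (Int × List Int)) (scanner_maps : List (Int × List (Int × List Int))) (out : Int × List Int × List Int) : Decidable (Spec_find_matching_neighbors principle_map scanner_maps out) := by unfold Spec_find_matching_neighbors; infer_instance

-- ===== CLAIM (what is proved, stated in full; the proofs are below) =====
def Claim_equal_find_matching_neighbors : Prop := ∀ (principle_map : List (Int × List Int)) (scanner_maps : List (Int × List (Int × List Int))), Dom_find_matching_neighbors principle_map scanner_maps → Pre_find_matching_neighbors principle_map scanner_maps → Spec_find_matching_neighbors principle_map scanner_maps (find_matching_neighbors principle_map scanner_maps)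

-- ===== LEMMAS AND PROOFS =====

-- first scanner (with its map) owning hash h, in scanner_maps order
def pvFirstOwner (h : Int) : List (Int × List (Int × List Int)) → Option (Int × List (Int × List Int))
  | [] => none
  | (s, m) :: rest => if h ∈ m.map Prod.fst then some (s, m) else pvFirstOwner h rest

def pvOr {α : Type} (a b : Option α) : Option α :=
  match a with
  | some v => some v
  | none => b

theorem pvKeyLoopA_eq (pm : List (Int × List Int)) (s : Int) (m : List (Int × List Int))
    (ph : Int) (l : List (Int × List Int)) :
    pvKeyLoopA pm s m ph l =
      if ph ∈ l.map Prod.fst then some (s, pvGetD pm ph, pvGetD m ph) else none := by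
  induction l with
  | nil => simp [pvKeyLoopA]
  | cons hd tl ih =>
    obtain ⟨sh, v⟩ := hd
    by_cases hsh : sh = ph
    · subst hsh; simp [pvKeyLoopA]
    · by_cases hmem : ph ∈ List.map Prod.fst tl <;>
        simp [pvKeyLoopA, hsh, ih, hmem, List.mem_cons, Ne.symm hsh]

theorem pvScanLoopA_eq (pm : List (Int × List Int)) (ph : Int)
    (sms : List (Int × List (Int × List Int))) :
    pvScanLoopA pm ph sms =
      (pvFirstOwner ph sms).map (fun sm => (sm.1, pvGetD pm ph, pvGetD sm.2 ph)) := by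
  induction sms with
  | nil => simp [pvScanLoopA, pvFirstOwner]
  | cons hd tl ih =>
    obtain ⟨s, m⟩ := hd
    by_cases hmem : ph ∈ m.map Prod.fst
    · simp [pvScanLoopA, pvFirstOwner, hmem, pvKeyLoopA_eq]
    · simp [pvScanLoopA, pvFirstOwner, hmem, pvKeyLoopA_eq, ih]

theorem pvIdxGet?_append (a b : List (Int × Int × List (Int × List Int))) (h : Int) :
    pvIdxGet? (a ++ b) h = pvOr (pvIdxGet? a h) (pvIdxGet? b h) := by
  induction a with
  | nil => simp [pvIdxGet?, pvOr]
  | cons hd tl ih =>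
    obtain ⟨k, v⟩ := hd
    by_cases hk : k = h <;> simp [pvIdxGet?, hk, ih, pvOr]

theorem pvIdxContains_eq (idx : List (Int × Int × List (Int × List Int))) (h : Int) :
    pvIdxContains idx h = (pvIdxGet? idx h).isSome := by
  induction idx with
  | nil => simp [pvIdxContains, pvIdxGet?]
  | cons hd tl ih =>
    obtain ⟨k, v⟩ := hd
    by_cases hk : k = h <;> simp [pvIdxContains, pvIdxGet?, hk, ih]

theorem pvAddKeys_get (s : Int) (m : List (Int × List Int)) (h : Int) :
    ∀ (l : List (Int × List Int)) (idx : List (Int × Int × List (Int × List Int))),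
    pvIdxGet? (pvAddKeys s m idx l) h =
      pvOr (pvIdxGet? idx h) (if h ∈ l.map Prod.fst then some (s, m) else none) := by
  intro l
  induction l with
  | nil => intro idx; cases hg : pvIdxGet? idx h <;> simp [pvAddKeys, pvOr, hg]
  | cons hd tl ih =>
    intro idx
    obtain ⟨k, v⟩ := hd
    simp only [pvAddKeys, ih]
    by_cases hc : pvIdxContains idx k = true
    · rw [if_pos hc]
      by_cases hk : k = h
      · subst hk
        rw [pvIdxContains_eq] at hc
        cases hg : pvIdxGet? idx k <;>
          simp [hg, pvOr, List.mem_cons] at hc ⊢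
      · cases hg : pvIdxGet? idx h <;>
          by_cases hmem : h ∈ List.map Prod.fst tl <;>
            simp [pvOr, hg, hmem, List.mem_cons, Ne.symm hk]
    · rw [if_neg hc, pvIdxGet?_append]
      by_cases hk : k = h
      · subst hk
        cases hg : pvIdxGet? idx k <;>
          simp [pvOr, hg, pvIdxGet?, List.mem_cons]
      · cases hg : pvIdxGet? idx h <;>
          by_cases hmem : h ∈ List.map Prod.fst tl <;>
            simp [pvOr, hg, pvIdxGet?, hk, hmem, List.mem_cons, Ne.symm hk]

theorem pvBuildIndex_get (h : Int) :
    ∀ (sms : List (Int × List (Int × List Int))) (idx : List (Int × Int × List (Int × List Int))),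
    pvIdxGet? (pvBuildIndex idx sms) h = pvOr (pvIdxGet? idx h) (pvFirstOwner h sms) := by
  intro sms
  induction sms with
  | nil => intro idx; cases hg : pvIdxGet? idx h <;> simp [pvBuildIndex, pvFirstOwner, pvOr, hg]
  | cons hd tl ih =>
    intro idx
    obtain ⟨s, m⟩ := hd
    simp only [pvBuildIndex, ih, pvAddKeys_get, pvFirstOwner]
    by_cases hmem : h ∈ m.map Prod.fst <;>
      cases hg : pvIdxGet? idx h <;> simp [pvOr, hg, hmem]

theorem pvGetD_append_of_no_key (ph : Int) :
    ∀ (pre l : List (Int × List Int)), (∀ p ∈ pre, p.1 ≠ ph) →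
    pvGetD (pre ++ l) ph = pvGetD l ph := by
  intro pre
  induction pre with
  | nil => intro l _; rfl
  | cons hd tl ih =>
    intro l hpre
    obtain ⟨k, v⟩ := hd
    have hk : k ≠ ph := hpre (k, v) (List.mem_cons_self)
    simp only [List.cons_append, pvGetD, if_neg hk]
    exact ih l (fun p hp => hpre p (List.mem_cons_of_mem _ hp))

theorem pvMain (sms : List (Int × List (Int × List Int))) :
    ∀ (rest pre : List (Int × List Int)),
    (∀ p ∈ pre, pvFirstOwner p.1 sms = none) →
    pvPrinLoopA (pre ++ rest) sms rest = pvLookupLoopB (pvBuildIndex [] sms) rest := by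
  intro rest
  induction rest with
  | nil => intro pre _; simp [pvPrinLoopA, pvLookupLoopB]
  | cons hd tl ih =>
    intro pre hpre
    obtain ⟨ph, v⟩ := hd
    have hb : pvIdxGet? (pvBuildIndex [] sms) ph = pvFirstOwner ph sms := by
      rw [pvBuildIndex_get]; rfl
    cases hfo : pvFirstOwner ph sms with
    | none =>
      have := ih (pre ++ [(ph, v)]) (by
        intro p hp
        rcases List.mem_append.1 hp with h1 | h2
        · exact hpre p h1
        · simp at h2; subst h2; exact hfo)
      simp only [List.append_assoc, List.singleton_append] at this
      simp only [pvPrinLoopA, pvLookupLoopB, pvScanLoopA_eq, hfo, hb, Option.map_none]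
      exact this
    | some sm =>
      obtain ⟨s, m⟩ := sm
      have hget : pvGetD (pre ++ (ph, v) :: tl) ph = v := by
        rw [pvGetD_append_of_no_key ph pre ((ph, v) :: tl) (fun p hp hcon => by
          have := hpre p hp; rw [hcon, hfo] at this; exact Option.some_ne_none _ this)]
        simp [pvGetD]
      simp [pvPrinLoopA, pvLookupLoopB, pvScanLoopA_eq, hfo, hb, hget]

-- ===== VERDICT (by name: the statement is the Claim_ definition above) =====
theorem find_matching_neighbors_spec : Claim_equal_find_matching_neighbors := by
  intro pm sms _ _
  unfold Spec_find_matching_neighbors find_matching_neighbors find_matching_neighbors_alt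
  rw [show pvPrinLoopA pm sms pm = pvPrinLoopA ([] ++ pm) sms pm from rfl,
      pvMain sms pm [] (by intro p hp; simp at hp)]
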